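-- pv_equiv track=rewrite | github.com/rosinality/halite | src/halite/transformers/tokainfer/engine/input_building.py | calc_kv_token_indices
-- ===== SOURCE A (Python) =====
-- def calc_kv_token_indices(
--     kv_block_indices: list[int], page_size: int, start_idx: int, num_tokens: int
-- ):
--     kv_token_indices = []
--     for pos in range(start_idx, start_idx + num_tokens):
--         block_idx = pos // page_size
--         kv_token_indices.append(
--             kv_block_indices[block_idx] * page_size + pos % page_size
--         )
--
--     return kv_token_indices
-- ===== SOURCE B (Python) =====
-- def calc_kv_token_indices(
--     kv_block_indices: list[int], page_size: int, start_idx: int, num_tokens: int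
-- ):
--     out = []
--     pos = start_idx
--     end = start_idx + num_tokens
--     while pos < end:
--         block_idx = pos // page_size
--         block_start = block_idx * page_size
--         block_base = kv_block_indices[block_idx] * page_size
--         stop = min(end, block_start + page_size)
--         for q in range(pos, stop):
--             out.append(block_base + (q - block_start))
--         pos = stop
--     return out
-- ===== Notes on version B (the rewrite author's own statement) =====
-- stated objective: alternative
-- what changed: Replaces the flat per-position loop (one floor division and one modulo per token) by a block-by-block outer loop that computes block_idx, block_start and block_base once per page and then streams the page's contiguous positions with plain additions in an inner loop.
-- outside the precondition, e.g. on calc_kv_token_indices([3], -2, 0, 1): A returns [-6], B raises IndexError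
import Mathlib
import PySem

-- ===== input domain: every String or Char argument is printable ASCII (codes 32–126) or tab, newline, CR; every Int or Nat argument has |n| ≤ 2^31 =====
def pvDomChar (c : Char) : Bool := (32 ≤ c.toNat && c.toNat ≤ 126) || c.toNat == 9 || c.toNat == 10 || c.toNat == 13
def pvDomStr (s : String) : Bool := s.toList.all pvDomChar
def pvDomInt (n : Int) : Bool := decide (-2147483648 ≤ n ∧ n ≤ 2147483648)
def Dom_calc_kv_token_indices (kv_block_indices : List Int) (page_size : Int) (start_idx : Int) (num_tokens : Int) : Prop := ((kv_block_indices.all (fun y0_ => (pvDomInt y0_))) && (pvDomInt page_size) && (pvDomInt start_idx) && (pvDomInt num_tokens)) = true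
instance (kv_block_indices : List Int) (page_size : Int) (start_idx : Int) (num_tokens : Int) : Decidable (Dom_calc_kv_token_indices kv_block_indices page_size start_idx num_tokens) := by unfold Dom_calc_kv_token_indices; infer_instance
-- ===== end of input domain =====

-- B hoists the per-page computation (block index, lookup, base) out of the inner loop,
-- streaming each page's contiguous positions with additions only (objective: alternative decomposition).

-- ===== PORT A =====
-- literal port of A: one flat loop over positions, a floor division, a modulo and a
-- list lookup per position; pyGetD is exact under Pre_ (index in range, else Python raises IndexError)
def calc_kv_token_indices (kv_block_indices : List Int) (page_size : Int) (start_idx : Int) (num_tokens : Int) : List Int :=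
  (PySem.List.pyRange start_idx (start_idx + num_tokens) 1).foldl
    (fun acc pos =>
      acc ++ [(PySem.List.pyGetD kv_block_indices (PySem.Int.floordiv pos page_size) 0) * page_size
               + PySem.Int.mod pos page_size]) []

-- ===== PORT B =====
-- literal port of B's while loop; fuel = num_tokens.toNat only makes the loop total
-- (each outer step consumes at least one position when page_size > 0, as Pre_ requires)
def pvAltLoop (kv : List Int) (p : Int) (e : Int) (pos : Int) (fuel : Nat) : List Int :=
  match fuel with
  | 0 => []
  | Nat.succ fuel =>
    if pos < e then
      let block_idx := PySem.Int.floordiv pos p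
      let block_start := block_idx * p
      let block_base := (PySem.List.pyGetD kv block_idx 0) * p
      let stop := min e (block_start + p)
      ((PySem.List.pyRange pos stop 1).map (fun q => block_base + (q - block_start)))
        ++ pvAltLoop kv p e stop fuel
    else []

def calc_kv_token_indices_alt (kv_block_indices : List Int) (page_size : Int) (start_idx : Int) (num_tokens : Int) : List Int :=
  pvAltLoop kv_block_indices page_size (start_idx + num_tokens) start_idx num_tokens.toNat

-- ===== PRECONDITION & SPEC =====
-- Pre_ restricts page_size to the natural domain of a page size (0 < page_size: on
-- page_size = 0 A raises ZeroDivisionError; on page_size < 0 A's value is an artefact of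
-- floor division on a nonsensical page size and B's while loop does not terminate), and
-- requires the first and last block indices to be valid Python indices (else A raises IndexError).
def Pre_calc_kv_token_indices (kv_block_indices : List Int) (page_size : Int) (start_idx : Int) (num_tokens : Int) : Prop :=
  0 < num_tokens →
    0 < page_size ∧
    -(kv_block_indices.length : Int) ≤ PySem.Int.floordiv start_idx page_size ∧
    PySem.Int.floordiv (start_idx + num_tokens - 1) page_size < (kv_block_indices.length : Int)
instance (kv_block_indices : List Int) (page_size : Int) (start_idx : Int) (num_tokens : Int) : Decidable (Pre_calc_kv_token_indices kv_block_indices page_size start_idx num_tokens) := by unfold Pre_calc_kv_token_indices; infer_instance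

def pvWitness_calc_kv_token_indices : List Int × Int × Int × Int := ([2, 5], 2, 1, 3)

def Spec_calc_kv_token_indices (kv_block_indices : List Int) (page_size : Int) (start_idx : Int) (num_tokens : Int) (out : List Int) : Prop := out = calc_kv_token_indices_alt kv_block_indices page_size start_idx num_tokens
instance (kv_block_indices : List Int) (page_size : Int) (start_idx : Int) (num_tokens : Int) (out : List Int) : Decidable (Spec_calc_kv_token_indices kv_block_indices page_size start_idx num_tokens out) := by unfold Spec_calc_kv_token_indices; infer_instance

-- ===== CLAIM (what is proved, stated in full; the proofs are below) =====
def Claim_equal_calc_kv_token_indices : Prop := ∀ (kv_block_indices : List Int) (page_size : Int) (start_idx : Int) (num_tokens : Int), Dom_calc_kv_token_indices kv_block_indices page_size start_idx num_tokens → Pre_calc_kv_token_indices kv_block_indices page_size start_idx num_tokens → Spec_calc_kv_token_indices kv_block_indices page_size start_idx num_tokens (calc_kv_token_indices kv_block_indices page_size start_idx num_tokens)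

-- ===== LEMMAS AND PROOFS =====

-- the per-position value A computes
def pvTok (kv : List Int) (p : Int) (q : Int) : Int :=
  (PySem.List.pyGetD kv (PySem.Int.floordiv q p) 0) * p + PySem.Int.mod q p

lemma pvAltLoop_eq (kv : List Int) (p : Int) (hp : 0 < p) (e : Int) :
    ∀ (fuel : Nat) (pos : Int), e ≤ pos + fuel →
      pvAltLoop kv p e pos fuel = (PySem.List.pyRange pos e 1).map (pvTok kv p) := by
  intro fuel
  induction fuel with
  | zero =>
    intro pos h
    simp only [pvAltLoop, PySem.List.pyRange_one]
    have : (e - pos).toNat = 0 := by omega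
    simp [this]
  | succ fuel ih =>
    intro pos h
    by_cases hlt : pos < e
    · rw [pvAltLoop]
      simp only [if_pos hlt]
      set b := PySem.Int.floordiv pos p with hbdef
      have hb : b * p ≤ pos ∧ pos < (b + 1) * p :=
        (PySem.Int.floordiv_eq_iff_of_pos (a := pos) hp).mp hbdef.symm
      have hub : pos < b * p + p := by
        have h2 := hb.2; rw [add_mul, one_mul] at h2; exact h2
      have hstop1 : pos < min e (b * p + p) := lt_min hlt hub
      have hstop2 : min e (b * p + p) ≤ e := min_le_left _ _
      have hstop3 : min e (b * p + p) ≤ b * p + p := min_le_right _ _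
      rw [PySem.List.pyRange_one_append pos (min e (b * p + p)) e (le_of_lt hstop1) hstop2,
          List.map_append]
      congr 1
      · apply List.map_congr_left
        intro q hq
        rw [PySem.List.mem_pyRange_one] at hq
        have hfd : PySem.Int.floordiv q p = b := by
          rw [PySem.Int.floordiv_eq_iff_of_pos hp]
          refine ⟨le_trans hb.1 hq.1, ?_⟩
          rw [add_mul, one_mul]; exact lt_of_lt_of_le hq.2 hstop3
        have hmod : PySem.Int.mod q p = q - b * p := by
          have hh := PySem.Int.floordiv_mul_add_mod q p
          rw [hfd] at hh; omega
        simp [pvTok, hfd, hmod]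
      · exact ih (min e (b * p + p)) (by omega)
    · rw [pvAltLoop]
      simp only [if_neg hlt]
      simp only [PySem.List.pyRange_one]
      have : (e - pos).toNat = 0 := by omega
      simp [this]

-- ===== VERDICT (by name: the statement is the Claim_ definition above) =====
theorem calc_kv_token_indices_spec : Claim_equal_calc_kv_token_indices := by
  intro kv p s n _ hpre
  unfold Spec_calc_kv_token_indices calc_kv_token_indices calc_kv_token_indices_alt
  by_cases hn : 0 < n
  · rw [PySem.List.foldl_append_singleton_eq_map, List.nil_append,
        pvAltLoop_eq kv p (hpre hn).1 (s + n) n.toNat s (by omega)]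
    rfl
  · have h1 : n.toNat = 0 := by omega
    have h2 : (s + n - s).toNat = 0 := by omega
    rw [PySem.List.foldl_append_singleton_eq_map, List.nil_append,
        PySem.List.pyRange_one, h2, h1]
    simp [pvAltLoop]
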